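-- pv_equiv track=rewrite | github.com/iproha94/contests | codeforces/1216/a.py | f
-- ===== SOURCE A (Python) =====
-- def f(s):
--     new_s:str = s[0]
--     count = 0
--     prev_char = new_s[-1]
--     for i in range(1, len(s)):
--         if i % 2:
--             if s[i] == prev_char:
--                 count += 1
--                 new_s += 'a' if s[i] == 'b' else 'b'
--             else:
--                 new_s += s[i]
--         else:
--             new_s += s[i]
--
--         prev_char = new_s[-1]
--
--     return f"{count}\n{new_s}"
-- ===== SOURCE B (Python) =====
-- def f(s):
--     out = []
--     count = 0
--     n = len(s)
--     for i in range(0, n - 1, 2):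
--         a, b = s[i], s[i + 1]
--         out.append(a)
--         if a == b:
--             count += 1
--             out.append('a' if b == 'b' else 'b')
--         else:
--             out.append(b)
--     if n % 2:
--         out.append(s[n - 1])
--     return f"{count}\n{''.join(out)}"
-- ===== Notes on version B (the rewrite author's own statement) =====
-- stated objective: simpler
-- what changed: B replaces A's index loop with parity tests and a running prev_char by a direct iteration over adjacent pairs (step 2), emitting the even char and the (possibly flipped) odd char per pair into a list joined once, with the trailing char appended for odd lengths.
-- outside the precondition, e.g. on f(''): A raises IndexError, B returns '0\n'
import Mathlib
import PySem

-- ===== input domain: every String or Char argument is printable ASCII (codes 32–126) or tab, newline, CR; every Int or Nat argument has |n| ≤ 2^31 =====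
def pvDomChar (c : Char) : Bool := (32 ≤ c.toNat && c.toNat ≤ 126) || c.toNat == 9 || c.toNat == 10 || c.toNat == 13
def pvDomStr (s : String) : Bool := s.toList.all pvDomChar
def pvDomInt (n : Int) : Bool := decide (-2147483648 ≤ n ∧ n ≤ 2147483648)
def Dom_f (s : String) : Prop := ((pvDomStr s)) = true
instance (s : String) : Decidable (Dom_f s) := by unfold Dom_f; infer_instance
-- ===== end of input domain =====

-- B iterates over adjacent pairs directly instead of A's index loop with parity tests; objective: simpler.
-- On the empty string A raises IndexError; that input is excluded by Pre_f.

-- ===== PORT A =====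
-- A's for-loop over i = 1 .. len(s)-1: structural recursion over the remaining chars,
-- carrying the parity of i (odd : Bool), the built string (newS), count and prev_char.
def fALoop : List Char → Bool → List Char → Int → Char → (List Char × Int)
  | [], _, newS, count, _ => (newS, count)
  | c :: rest, odd, newS, count, prev =>
    if odd then
      if c == prev then
        fALoop rest false (newS ++ [if c == 'b' then 'a' else 'b']) (count + 1)
          (if c == 'b' then 'a' else 'b')
      else fALoop rest false (newS ++ [c]) count c
    else fALoop rest true (newS ++ [c]) count c

def f (s : String) : String :=
  match s.toList with
  | [] => ""   -- Python: IndexError on s[0]; excluded by Pre_f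
  | c0 :: rest =>
    let r := fALoop rest true [c0] 0 c0
    PySem.Int.toStr r.2 ++ "\n" ++ String.ofList r.1

-- ===== PORT B =====
-- B's step-2 loop over pairs: recursion consuming two chars at a time, appending to out.
def fBLoop : List Char → List Char → Int → (List Char × Int)
  | a :: b :: rest, out, cnt =>
    if a == b then fBLoop rest (out ++ [a, if b == 'b' then 'a' else 'b']) (cnt + 1)
    else fBLoop rest (out ++ [a, b]) cnt
  | [c], out, cnt => (out ++ [c], cnt)
  | [], out, cnt => (out, cnt)

def f_alt (s : String) : String :=
  let r := fBLoop s.toList [] 0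
  PySem.Int.toStr r.2 ++ "\n" ++ String.ofList r.1

-- ===== PRECONDITION & SPEC =====
-- Pre_f excludes only the empty string, on which A raises IndexError (s[0]).
def Pre_f (s : String) : Prop := s ≠ ""
instance (s : String) : Decidable (Pre_f s) := by unfold Pre_f; infer_instance
def pvWitness_f : String := "abba"

def Spec_f (s : String) (out : String) : Prop := out = f_alt s
instance (s : String) (out : String) : Decidable (Spec_f s out) := by unfold Spec_f; infer_instance

-- ===== CLAIM (what is proved, stated in full; the proofs are below) =====
def Claim_equal_f : Prop := ∀ (s : String), Dom_f s → Pre_f s → Spec_f s (f s)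

-- ===== LEMMAS AND PROOFS =====

theorem fALoop_cons_true (c : Char) (rest newS : List Char) (count : Int) (prev : Char) :
    fALoop (c :: rest) true newS count prev =
      if c == prev then
        fALoop rest false (newS ++ [if c == 'b' then 'a' else 'b']) (count + 1)
          (if c == 'b' then 'a' else 'b')
      else fALoop rest false (newS ++ [c]) count c := by
  simp [fALoop]

-- A's loop in an even-index state just copies the next char (the even branch ignores prev).
theorem fALoop_cons_false (c : Char) (rest newS : List Char) (count : Int) (prev : Char) :
    fALoop (c :: rest) false newS count prev = fALoop rest true (newS ++ [c]) count c := by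
  simp [fALoop]

theorem fBLoop_cons2 (a b : Char) (rest out : List Char) (cnt : Int) :
    fBLoop (a :: b :: rest) out cnt =
      if a == b then fBLoop rest (out ++ [a, if b == 'b' then 'a' else 'b']) (cnt + 1)
      else fBLoop rest (out ++ [a, b]) cnt := rfl

-- State correspondence: A's loop at an odd index with prev = a (the char just emitted)
-- computes the same result as B's pair loop on a :: rest.
theorem pv_key (n : Nat) : ∀ (rest : List Char), rest.length ≤ n →
    ∀ (acc : List Char) (cnt : Int) (a : Char),
    fALoop rest true (acc ++ [a]) cnt a = fBLoop (a :: rest) acc cnt := by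
  induction n with
  | zero =>
    intro rest h acc cnt a
    have hr : rest = [] := List.eq_nil_of_length_eq_zero (Nat.le_zero.mp h)
    subst hr
    simp [fALoop, fBLoop]
  | succ n ih =>
    intro rest h acc cnt a
    match rest with
    | [] => simp [fALoop, fBLoop]
    | [b] =>
      rw [fALoop_cons_true, fBLoop_cons2]
      by_cases hab : a = b
      · subst hab
        simp [fALoop, fBLoop]
      · rw [if_neg (by simp [Ne.symm hab]), if_neg (by simp [hab])]
        simp [fALoop, fBLoop]
    | b :: c :: r =>
      have hr : r.length ≤ n := by simp at h; omega
      rw [fALoop_cons_true, fBLoop_cons2]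
      by_cases hab : a = b
      · subst hab
        rw [if_pos (show (a == a) = true from beq_self_eq_true a),
          if_pos (show (a == a) = true from beq_self_eq_true a), fALoop_cons_false]
        have := ih r hr (acc ++ [a, if a == 'b' then 'a' else 'b']) (cnt + 1) c
        simpa only [List.append_assoc, List.cons_append, List.nil_append] using this
      · rw [if_neg (by simp [Ne.symm hab]), if_neg (by simp [hab]), fALoop_cons_false]
        have := ih r hr (acc ++ [a, b]) cnt c
        simpa only [List.append_assoc, List.cons_append, List.nil_append] using this

-- ===== VERDICT (by name: the statement is the Claim_ definition above) =====
theorem f_spec : Claim_equal_f := by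
  intro s _ hpre
  unfold Spec_f f f_alt
  cases hl : s.toList with
  | nil => exact absurd (String.toList_eq_nil_iff.mp hl) hpre
  | cons c0 rest =>
    have := pv_key rest.length rest (le_refl _) [] 0 c0
    simp only [List.nil_append] at this
    simp [this]
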